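-- pv_equiv track=rewrite | github.com/ethancoyle7/Various-Python-Scripts | Ottnedorf_Cipher/main.py | decrypt_ottendorf
-- ===== SOURCE A (Python) =====
-- def decrypt_ottendorf(encrypted_message, key):
--     """Decrypt an encrypted message using the Ottendorf Cipher and a key (text)"""
--     key_index = 0
--     decrypted_message = ""
--     key = key.lower()
--     for char in encrypted_message:
--         if char.isalpha():
--             char_index = ord(char) - ord('a')
--             key_char = key[key_index % len(key)]
--             key_char_index = ord(key_char) - ord('a')
--             decrypted_char = chr((char_index - key_char_index) % 26 + ord('a'))
--             key_index += 1
--         else: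
--             decrypted_char = char
--         decrypted_message += decrypted_char
--     return decrypted_message
-- ===== SOURCE B (Python) =====
-- def decrypt_ottendorf(encrypted_message, key):
--     """Decrypt an encrypted message using the Ottendorf Cipher and a key (text)"""
--     key = key.lower()
--     letters = [c for c in encrypted_message if c.isalpha()]
--     decrypted = [
--         chr((ord(c) - ord('a') - (ord(key[i % len(key)]) - ord('a'))) % 26 + ord('a'))
--         for i, c in enumerate(letters)
--     ]
--     it = iter(decrypted)
--     return ''.join(next(it) if c.isalpha() else c for c in encrypted_message)
-- ===== Notes on version B (the rewrite author's own statement) =====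
-- stated objective: alternative
-- what changed: Replaces A's single stateful pass (running key index, string concatenation) by an index-then-merge two-pass structure: collect the alphabetic characters, decrypt them in one batch with enumerate (i-th letter uses key[i % len(key)]), then merge them back over the original string with join, copying non-alpha characters unchanged.
import Mathlib
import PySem

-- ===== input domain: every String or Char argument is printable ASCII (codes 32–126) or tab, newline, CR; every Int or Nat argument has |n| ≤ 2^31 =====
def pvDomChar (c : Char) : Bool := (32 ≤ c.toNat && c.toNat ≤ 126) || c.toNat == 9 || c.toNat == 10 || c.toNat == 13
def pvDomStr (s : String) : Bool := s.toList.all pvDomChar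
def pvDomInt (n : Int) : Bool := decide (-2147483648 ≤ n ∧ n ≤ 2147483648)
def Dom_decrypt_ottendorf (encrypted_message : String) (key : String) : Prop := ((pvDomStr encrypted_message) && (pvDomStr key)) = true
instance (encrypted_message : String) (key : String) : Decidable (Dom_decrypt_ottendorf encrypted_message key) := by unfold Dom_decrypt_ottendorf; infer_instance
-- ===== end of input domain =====

-- B replaces A's single stateful pass by an index-then-merge two-pass structure (alternative decomposition, same cost class).


-- ===== PORT A =====
-- A's for-loop: running key_index, one pass, output built in order.
-- key[key_index % len(key)] is ported as getD; Pre_ excludes the empty-key ZeroDivisionError case.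
def decryptA (keyl : List Char) (keyIndex : Nat) : List Char → List Char
  | [] => []
  | c :: rest =>
    if PySem.Chars.isalpha c then
      let charIndex : Int := (c.toNat : Int) - 97
      let keyChar : Char := keyl.getD (keyIndex % keyl.length) 'a'
      let keyCharIndex : Int := (keyChar.toNat : Int) - 97
      let decryptedChar : Char := Char.ofNat (PySem.Int.mod (charIndex - keyCharIndex) 26 + 97).toNat
      decryptedChar :: decryptA keyl (keyIndex + 1) rest
    else
      c :: decryptA keyl keyIndex rest

def decrypt_ottendorf (encrypted_message : String) (key : String) : String :=
  let keyl := PySem.Chars.lower key.toList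
  String.ofList (decryptA keyl 0 encrypted_message.toList)

-- ===== PORT B =====
-- B: filter the letters, decrypt them in one batch via enumerate, merge back over the original.
def decryptLetterB (keyl : List Char) (p : Int × Char) : Char :=
  Char.ofNat
    (PySem.Int.mod
      (((p.2.toNat : Int) - 97) -
        (((keyl.getD (PySem.Int.mod p.1 (keyl.length : Int)).toNat 'a').toNat : Int) - 97)) 26
      + 97).toNat

-- ''.join(next(it) if c.isalpha() else c for c in encrypted_message): each alpha position
-- consumes the next decrypted letter (the [] alpha branch is unreachable: there is one
-- decrypted letter per alpha character).
def mergeB : List Char → List Char → List Char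
  | [], _ => []
  | c :: rest, ds =>
    if PySem.Chars.isalpha c then
      match ds with
      | d :: ds' => d :: mergeB rest ds'
      | [] => c :: mergeB rest []
    else
      c :: mergeB rest ds

def decrypt_ottendorf_alt (encrypted_message : String) (key : String) : String :=
  let keyl := PySem.Chars.lower key.toList
  let letters := encrypted_message.toList.filter PySem.Chars.isalpha
  let decrypted := (PySem.List.enumerate letters 0).map (decryptLetterB keyl)
  String.ofList (mergeB encrypted_message.toList decrypted)

-- ===== PRECONDITION & SPEC =====
-- Pre_ excludes exactly the inputs where the Python A raises ZeroDivisionError: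
-- an empty key together with at least one alphabetic character in the message.
def Pre_decrypt_ottendorf (encrypted_message : String) (key : String) : Prop :=
  key ≠ "" ∨ encrypted_message.toList.all (fun c => !PySem.Chars.isalpha c) = true
instance (encrypted_message : String) (key : String) : Decidable (Pre_decrypt_ottendorf encrypted_message key) := by
  unfold Pre_decrypt_ottendorf; infer_instance

def pvWitness_decrypt_ottendorf : String × String := ("Dwwdfn Dw GdZQ, 99!", "abc")

def Spec_decrypt_ottendorf (encrypted_message : String) (key : String) (out : String) : Prop := out = decrypt_ottendorf_alt encrypted_message key
instance (encrypted_message : String) (key : String) (out : String) : Decidable (Spec_decrypt_ottendorf encrypted_message key out) := by unfold Spec_decrypt_ottendorf; infer_instance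

-- ===== CLAIM (what is proved, stated in full; the proofs are below) =====
def Claim_equal_decrypt_ottendorf : Prop := ∀ (encrypted_message : String) (key : String), Dom_decrypt_ottendorf encrypted_message key → Pre_decrypt_ottendorf encrypted_message key → Spec_decrypt_ottendorf encrypted_message key (decrypt_ottendorf encrypted_message key)

-- ===== LEMMAS AND PROOFS =====

theorem getD_mod_int_eq (keyl : List Char) (ki : Nat) :
    ((ki : Int) % (keyl.length : Int)).toNat = ki % keyl.length := by
  omega

theorem decryptA_eq_merge (keyl : List Char) :
    ∀ (cs : List Char) (ki : Nat),
      decryptA keyl ki cs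
        = mergeB cs ((PySem.List.enumerate (cs.filter PySem.Chars.isalpha) (ki : Int)).map
            (decryptLetterB keyl)) := by
  intro cs
  induction cs with
  | nil => intro ki; simp [decryptA, mergeB]
  | cons c rest ih =>
    intro ki
    by_cases h : PySem.Chars.isalpha c = true
    · have hstep := ih (ki + 1)
      simp [decryptA, mergeB, h, PySem.List.enumerate_cons, decryptLetterB,
        getD_mod_int_eq, hstep]
    · simp [decryptA, mergeB, h, ih ki]

-- ===== VERDICT (by name: the statement is the Claim_ definition above) =====
theorem decrypt_ottendorf_spec : Claim_equal_decrypt_ottendorf := by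
  intro em key _ _
  unfold Spec_decrypt_ottendorf decrypt_ottendorf decrypt_ottendorf_alt
  have h := decryptA_eq_merge (PySem.Chars.lower key.toList) em.toList 0
  simpa using congrArg String.ofList h
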